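-- pv_equiv track=rewrite | github.com/Clive-Chen01/Rhombus-AI | backend/api/services/file_io.py | _dedupe_and_fill_headers
-- ===== SOURCE A (Python) =====
-- def _dedupe_and_fill_headers(headers: list[str]) -> list[str]:
--     cleaned: list[str] = []
--     counts: dict[str, int] = {}
--     for idx, h in enumerate(headers, start=1):
--         name = (h or "").strip()
--         if not name:
--             name = f"Unnamed_{idx}"
--         base = name
--         if base in counts:
--             counts[base] += 1
--             name = f"{base}_{counts[base]}"
--         else:
--             counts[base] = 1
--         cleaned.append(name)
--     return cleaned
-- ===== SOURCE B (Python) =====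
-- def _dedupe_and_fill_headers(headers: list[str]) -> list[str]:
--     bases = [(h or "").strip() or f"Unnamed_{i}" for i, h in enumerate(headers, 1)]
--     groups: dict[str, list[int]] = {}
--     for pos, b in enumerate(bases):
--         groups.setdefault(b, []).append(pos)
--     out = [""] * len(headers)
--     for b, positions in groups.items():
--         out[positions[0]] = b
--         for j, p in enumerate(positions[1:], start=2):
--             out[p] = f"{b}_{j}"
--     return out
-- ===== Notes on version B (the rewrite author's own statement) =====
-- stated objective: alternative
-- what changed: A's single stateful scan with a running-count dict is replaced by a two-phase build-index-then-scatter algorithm: first group the filled base names into a dict mapping base -> ordered list of positions, then write each group's names (first position bare, j-th subsequent position base_j) into a preallocated output list by position.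
import Mathlib
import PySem

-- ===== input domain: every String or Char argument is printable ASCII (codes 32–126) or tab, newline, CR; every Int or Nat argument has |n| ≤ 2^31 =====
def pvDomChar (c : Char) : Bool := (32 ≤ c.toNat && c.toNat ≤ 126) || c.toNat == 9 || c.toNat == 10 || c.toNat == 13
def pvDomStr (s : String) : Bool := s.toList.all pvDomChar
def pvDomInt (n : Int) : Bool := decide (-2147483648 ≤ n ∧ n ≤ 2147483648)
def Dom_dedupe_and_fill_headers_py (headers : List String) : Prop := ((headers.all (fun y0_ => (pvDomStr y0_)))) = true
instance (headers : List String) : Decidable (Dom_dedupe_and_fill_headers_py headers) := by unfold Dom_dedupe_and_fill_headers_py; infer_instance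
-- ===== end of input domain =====

-- B replaces A's single stateful scan (running-count dict) with a build-index-then-scatter
-- algorithm (group positions by base, then write each group's names by position); alternative, not faster.

-- ===== PORT A =====
-- name = (h or "").strip(); if not name: name = f"Unnamed_{idx}"  (idx 1-based)
def pvBaseA (p : Int × String) : String :=
  let name := PySem.Str.strip (if p.2 = "" then "" else p.2)
  if name = "" then "Unnamed_" ++ PySem.Int.toStr p.1 else name

def dedupe_and_fill_headers_py (headers : List String) : List String :=
  ((PySem.List.enumerate headers 1).foldl
    (fun st p =>
      let base := pvBaseA p
      match st.2.get? base with
      | some c => (st.1 ++ [base ++ "_" ++ PySem.Int.toStr (c + 1)], st.2.insert base (c + 1))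
      | none => (st.1 ++ [base], st.2.insert base 1))
    ([], PySem.Dict.empty)).1

-- ===== PORT B =====
-- (h or "").strip() or f"Unnamed_{i}"  (i 1-based)
def pvBaseB (p : Int × String) : String :=
  let s := PySem.Str.strip (if p.2 = "" then "" else p.2)
  if s = "" then "Unnamed_" ++ PySem.Int.toStr p.1 else s

-- out[positions[0]] = b; for j, p in enumerate(positions[1:], 2): out[p] = f"{b}_{j}"
-- (a group's position list is never empty, so the [] branch is unreachable)
def pvScatter (out : List String) (it : String × List Int) : List String :=
  match it.2 with
  | [] => out
  | p0 :: rest =>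
      (PySem.List.enumerate rest 2).foldl
        (fun o q => PySem.List.pySetD o q.2 (it.1 ++ "_" ++ PySem.Int.toStr q.1))
        (PySem.List.pySetD out p0 it.1)

def dedupe_and_fill_headers_py_alt (headers : List String) : List String :=
  let bases := (PySem.List.enumerate headers 1).map pvBaseB
  let groups := (PySem.List.enumerate bases 0).foldl
      (fun d q => d.modify q.2 [] (· ++ [q.1])) (PySem.Dict.empty)
  groups.items.foldl pvScatter (List.replicate headers.length "")

-- ===== PRECONDITION & SPEC =====
def Spec_dedupe_and_fill_headers_py (headers : List String) (out : List String) : Prop := out = dedupe_and_fill_headers_py_alt headers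
instance (headers : List String) (out : List String) : Decidable (Spec_dedupe_and_fill_headers_py headers out) := by unfold Spec_dedupe_and_fill_headers_py; infer_instance

-- ===== CLAIM (what is proved, stated in full; the proofs are below) =====
def Claim_equal_dedupe_and_fill_headers_py : Prop := ∀ (headers : List String), Dom_dedupe_and_fill_headers_py headers → Spec_dedupe_and_fill_headers_py headers (dedupe_and_fill_headers_py headers)

-- ===== LEMMAS AND PROOFS =====

-- common specification: name each element from the multiset of bases already seen
def pvSpec (seen : List String) : List String → List String
  | [] => []
  | b :: rest =>
      (if seen.count b = 0 then b
       else b ++ "_" ++ PySem.Int.toStr ((seen.count b : Int) + 1)) :: pvSpec (seen ++ [b]) rest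

def pvStepA (st : List String × PySem.Dict String Int) (base : String) :
    List String × PySem.Dict String Int :=
  match st.2.get? base with
  | some c => (st.1 ++ [base ++ "_" ++ PySem.Int.toStr (c + 1)], st.2.insert base (c + 1))
  | none => (st.1 ++ [base], st.2.insert base 1)

def pvInv (seen : List String) (d : PySem.Dict String Int) : Prop :=
  ∀ b, d.get? b = if seen.count b = 0 then none else some ((seen.count b : Int))

lemma pvInv_insert (seen : List String) (d : PySem.Dict String Int) (b : String)
    (h : pvInv seen d) :
    pvInv (seen ++ [b]) (d.insert b ((seen.count b : Int) + 1)) := by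
  intro b'
  rw [PySem.Dict.get?_insert]
  by_cases hb : b' = b
  · subst hb
    simp [List.count_append]
  · rw [if_neg hb, h b']
    have : (seen ++ [b]).count b' = seen.count b' := by
      simp [List.count_append, Ne.symm hb]
    rw [this]

lemma pvA_fold (bs : List String) :
    ∀ (seen acc : List String) (d : PySem.Dict String Int), pvInv seen d →
      (bs.foldl pvStepA (acc, d)).1 = acc ++ pvSpec seen bs := by
  induction bs with
  | nil => intro seen acc d _; simp [pvSpec]
  | cons b rest ih =>
    intro seen acc d hinv
    have hb := hinv b
    by_cases h0 : seen.count b = 0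
    · rw [if_pos h0] at hb
      have hstep : pvStepA (acc, d) b = (acc ++ [b], d.insert b 1) := by
        simp [pvStepA, hb]
      have hins : pvInv (seen ++ [b]) (d.insert b 1) := by
        have := pvInv_insert seen d b hinv
        rwa [h0] at this
      simp only [List.foldl_cons, hstep]
      rw [ih (seen ++ [b]) (acc ++ [b]) _ hins]
      simp [pvSpec, h0]
    · rw [if_neg h0] at hb
      have hstep : pvStepA (acc, d) b =
          (acc ++ [b ++ "_" ++ PySem.Int.toStr ((seen.count b : Int) + 1)],
           d.insert b ((seen.count b : Int) + 1)) := by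
        simp [pvStepA, hb]
      simp only [List.foldl_cons, hstep]
      rw [ih (seen ++ [b]) _ _ (pvInv_insert seen d b hinv)]
      simp [pvSpec, h0]

lemma pvA_eq_spec (headers : List String) :
    dedupe_and_fill_headers_py headers
      = pvSpec [] ((PySem.List.enumerate headers 1).map pvBaseA) := by
  unfold dedupe_and_fill_headers_py
  have hfold : (PySem.List.enumerate headers 1).foldl
      (fun st p =>
        let base := pvBaseA p
        match st.2.get? base with
        | some c => (st.1 ++ [base ++ "_" ++ PySem.Int.toStr (c + 1)], st.2.insert base (c + 1))
        | none => (st.1 ++ [base], st.2.insert base 1))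
      ([], PySem.Dict.empty)
      = ((PySem.List.enumerate headers 1).map pvBaseA).foldl pvStepA ([], PySem.Dict.empty) := by
    rw [List.foldl_map]
    rfl
  rw [hfold,
    pvA_fold _ [] [] PySem.Dict.empty (fun b => by simp [PySem.Dict.get?_empty])]
  simp

-- positions (starting at s) of the occurrences of b in a list
def posIdx (b : String) (s : Int) : List String → List Int
  | [] => []
  | x :: xs => if x = b then s :: posIdx b (s + 1) xs else posIdx b (s + 1) xs

lemma mem_posIdx (b : String) :
    ∀ (bs : List String) (s p : Int),
      p ∈ posIdx b s bs ↔ ∃ i : Nat, p = s + i ∧ bs[i]? = some b := by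
  intro bs
  induction bs with
  | nil => intro s p; simp [posIdx]
  | cons x xs ih =>
    intro s p
    by_cases hx : x = b
    · simp only [posIdx, if_pos hx, List.mem_cons, ih (s + 1)]
      constructor
      · rintro (rfl | ⟨i, rfl, hi⟩)
        · exact ⟨0, by simp, by simp [hx]⟩
        · exact ⟨i + 1, by push_cast; omega, by simpa using hi⟩
      · rintro ⟨i, rfl, hi⟩
        cases i with
        | zero => left; simp
        | succ j => right; exact ⟨j, by push_cast; omega, by simpa using hi⟩
    · simp only [posIdx, if_neg hx, ih (s + 1)]
      constructor
      · rintro ⟨i, rfl, hi⟩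
        exact ⟨i + 1, by push_cast; omega, by simpa using hi⟩
      · rintro ⟨i, rfl, hi⟩
        cases i with
        | zero => simp at hi; exact absurd hi hx
        | succ j => exact ⟨j, by push_cast; omega, by simpa using hi⟩

lemma nodup_posIdx (b : String) :
    ∀ (bs : List String) (s : Int), (posIdx b s bs).Nodup := by
  intro bs
  induction bs with
  | nil => intro s; simp [posIdx]
  | cons x xs ih =>
    intro s
    by_cases hx : x = b
    · simp only [posIdx, if_pos hx]
      refine List.nodup_cons.mpr ⟨?_, ih (s + 1)⟩
      intro hmem
      obtain ⟨i, hi, _⟩ := (mem_posIdx b xs (s + 1) s).mp hmem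
      omega
    · simp only [posIdx, if_neg hx]; exact ih (s + 1)

lemma idxOf_posIdx (b : String) :
    ∀ (bs : List String) (s : Int) (i : Nat), bs[i]? = some b →
      (posIdx b s bs).idxOf (s + (i : Int)) = (bs.take i).count b := by
  intro bs
  induction bs with
  | nil => intro s i hi; simp at hi
  | cons x xs ih =>
    intro s i hi
    cases i with
    | zero =>
      simp only [List.getElem?_cons_zero, Option.some_inj] at hi
      subst hi
      simp [posIdx]
    | succ j =>
      simp only [List.getElem?_cons_succ] at hi
      by_cases hx : x = b
      · subst hx
        simp only [posIdx, if_true, List.take_succ_cons, List.count_cons]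
        rw [List.idxOf_cons]
        have h1 : s + ((j + 1 : Nat) : Int) = (s + 1) + (j : Int) := by push_cast; omega
        rw [h1]
        have hne' : ((s == s + 1 + (j:Int))) = false := by
          simp; omega
        simp only [hne', cond_false]
        rw [ih (s + 1) j hi]
        simp
      · simp only [posIdx, if_neg hx, List.take_succ_cons, List.count_cons]
        have : s + ((j + 1 : Nat) : Int) = (s + 1) + (j : Int) := by push_cast; omega
        rw [this, ih (s + 1) j hi]
        have : (x == b) = false := by simpa using hx
        simp [this]

lemma posIdx_eq_filter (b : String) :
    ∀ (bs : List String) (s : Int),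
      ((((PySem.List.enumerate bs s).map Prod.swap).filter (fun p => p.1 == b)).map (·.2))
        = posIdx b s bs := by
  intro bs
  induction bs with
  | nil => intro s; simp [PySem.List.enumerate_nil, posIdx]
  | cons x xs ih =>
    intro s
    rw [PySem.List.enumerate_cons]
    by_cases hx : x = b
    · simp only [List.map_cons, Prod.swap_prod_mk, List.filter_cons, hx,
        beq_self_eq_true, if_true, List.map_cons, posIdx, ih (s + 1)]
    · have hxb : (x == b) = false := by simpa using hx
      simp only [List.map_cons, Prod.swap_prod_mk, List.filter_cons, hxb,
        posIdx, if_neg hx]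
      exact ih (s + 1)

lemma pvSpec_length : ∀ (bs seen : List String), (pvSpec seen bs).length = bs.length := by
  intro bs
  induction bs with
  | nil => intro seen; simp [pvSpec]
  | cons b rest ih => intro seen; simp [pvSpec, ih]

lemma pvSpec_getElem? :
    ∀ (bs seen : List String) (i : Nat),
      (pvSpec seen bs)[i]? = (bs[i]?).map (fun b =>
        if seen.count b + (bs.take i).count b = 0 then b
        else b ++ "_" ++ PySem.Int.toStr (((seen.count b + (bs.take i).count b : Nat) : Int) + 1)) := by
  intro bs
  induction bs with
  | nil => intro seen i; simp [pvSpec]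
  | cons b rest ih =>
    intro seen i
    cases i with
    | zero => simp [pvSpec]
    | succ j =>
      simp only [pvSpec, List.getElem?_cons_succ, List.take_succ_cons, ih (seen ++ [b]) j]
      cases hj : rest[j]? with
      | none => simp
      | some c =>
        simp only [Option.map_some]
        have h : (seen ++ [b]).count c + (rest.take j).count c
            = seen.count c + (b :: rest.take j).count c := by
          simp [List.count_append, List.count_cons]
          omega
        rw [h]

lemma set_getElem? (l : List String) (i : Nat) (v : String) (j : Nat) :
    (l.set i v)[j]? = if i = j ∧ i < l.length then some v else l[j]? := by
  simp [List.getElem?_set]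
  split_ifs <;> first | rfl | (simp_all; omega) | simp_all

lemma writeFold_length (b : String) :
    ∀ (rest : List Int) (k : Int) (o : List String),
      ((PySem.List.enumerate rest k).foldl
        (fun o q => PySem.List.pySetD o q.2 (b ++ "_" ++ PySem.Int.toStr q.1)) o).length
        = o.length := by
  intro rest
  induction rest with
  | nil => intro k o; simp [PySem.List.enumerate_nil]
  | cons p ps ih =>
    intro k o
    rw [PySem.List.enumerate_cons]
    simp only [List.foldl_cons]
    rw [ih (k + 1)]
    exact PySem.List.length_pySetD o p _

lemma writeFold_getElem? (b : String) :
    ∀ (rest : List Int) (k : Int) (o : List String) (i : Nat),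
      rest.Nodup → (∀ p ∈ rest, 0 ≤ p ∧ p < (o.length : Int)) →
      ((PySem.List.enumerate rest k).foldl
        (fun o q => PySem.List.pySetD o q.2 (b ++ "_" ++ PySem.Int.toStr q.1)) o)[i]?
        = if (i : Int) ∈ rest then
            some (b ++ "_" ++ PySem.Int.toStr (k + (rest.idxOf (i : Int) : Int)))
          else o[i]? := by
  intro rest
  induction rest with
  | nil => intro k o i _ _; simp [PySem.List.enumerate_nil]
  | cons p ps ih =>
    intro k o i hnd hbd
    obtain ⟨hp0, hplen⟩ := hbd p (List.mem_cons_self ..)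
    rw [PySem.List.enumerate_cons]
    simp only [List.foldl_cons]
    have hset : PySem.List.pySetD o p (b ++ "_" ++ PySem.Int.toStr k)
        = o.set p.toNat (b ++ "_" ++ PySem.Int.toStr k) :=
      PySem.List.pySetD_of_nonneg o _ hp0
    have hlen' : (PySem.List.pySetD o p (b ++ "_" ++ PySem.Int.toStr k)).length = o.length :=
      PySem.List.length_pySetD o p _
    have hnd' := (List.nodup_cons.mp hnd).2
    have hpnot := (List.nodup_cons.mp hnd).1
    have hbd' : ∀ q ∈ ps, 0 ≤ q ∧ q <
        ((PySem.List.pySetD o p (b ++ "_" ++ PySem.Int.toStr k)).length : Int) := by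
      intro q hq; rw [hlen']; exact hbd q (List.mem_cons_of_mem _ hq)
    rw [ih (k + 1) _ i hnd' hbd']
    by_cases hmem : (i : Int) ∈ ps
    · rw [if_pos hmem, if_pos (List.mem_cons_of_mem _ hmem)]
      have hip : (i : Int) ≠ p := fun h => hpnot (h ▸ hmem)
      have : (p :: ps).idxOf (i : Int) = ps.idxOf (i : Int) + 1 := by
        rw [List.idxOf_cons]
        have hpi : (p == (i : Int)) = false := by
          simp
          omega
        rw [hpi, cond_false]
      rw [this]
      have harg2 : (k + ((ps.idxOf (i : Int) + 1 : Nat) : Int))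
          = (k + 1) + ((ps.idxOf (i : Int) : Nat) : Int) := by push_cast; omega
      rw [harg2]
    · rw [if_neg hmem, hset]
      rw [set_getElem?]
      by_cases hip : (i : Int) = p
      · have hpt : p.toNat = i := by omega
        rw [if_pos ⟨hpt, by omega⟩, if_pos (by rw [← hip]; exact List.mem_cons_self ..)]
        have : (p :: ps).idxOf (i : Int) = 0 := by
          rw [hip, List.idxOf_cons]
          simp
        rw [this]
        simp
      · have hpt : ¬ (p.toNat = i ∧ p.toNat < o.length) := by
          intro ⟨h1, _⟩; omega
        rw [if_neg hpt]
        rw [if_neg (by simp [hip, hmem])]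

lemma pvScatter_length (o : List String) (g : String × List Int) :
    (pvScatter o g).length = o.length := by
  match g with
  | (b, []) => rfl
  | (b, p0 :: rest) =>
    show ((PySem.List.enumerate rest 2).foldl
      (fun o q => PySem.List.pySetD o q.2 (b ++ "_" ++ PySem.Int.toStr q.1))
      (PySem.List.pySetD o p0 b)).length = o.length
    rw [writeFold_length]
    exact PySem.List.length_pySetD o p0 _

lemma pvScatter_getElem? (bs : List String) (b : String) (o : List String)
    (hlen : o.length = bs.length) (i : Nat) :
    (pvScatter o (b, posIdx b 0 bs))[i]?
      = if bs[i]? = some b then (pvSpec [] bs)[i]? else o[i]? := by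
  have hmemchar : ∀ j : Nat, ((j : Int) ∈ posIdx b 0 bs ↔ bs[j]? = some b) := by
    intro j
    rw [mem_posIdx]
    constructor
    · rintro ⟨i', he, hi⟩
      have : i' = j := by omega
      subst this; exact hi
    · intro h; exact ⟨j, by simp, h⟩
  have hbd : ∀ p ∈ posIdx b 0 bs, 0 ≤ p ∧ p < (bs.length : Int) := by
    intro p hp
    obtain ⟨i', he, hi⟩ := (mem_posIdx b bs 0 p).mp hp
    obtain ⟨hlt, -⟩ := List.getElem?_eq_some_iff.mp hi
    omega
  have hnd := nodup_posIdx b bs 0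
  cases hps : posIdx b 0 bs with
  | nil =>
    have hnot : ¬ bs[i]? = some b := by
      intro h
      have := (hmemchar i).mpr h
      rw [hps] at this
      simp at this
    rw [if_neg hnot]
    rfl
  | cons p0 rest =>
    rw [hps] at hmemchar hbd hnd
    have hndrest := (List.nodup_cons.mp hnd).2
    have hp0not := (List.nodup_cons.mp hnd).1
    obtain ⟨hp00, hp0len⟩ := hbd p0 (List.mem_cons_self ..)
    have hset0 : PySem.List.pySetD o p0 b = o.set p0.toNat b :=
      PySem.List.pySetD_of_nonneg o _ hp00
    have hlen0 : (PySem.List.pySetD o p0 b).length = o.length :=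
      PySem.List.length_pySetD o p0 _
    have hbd' : ∀ q ∈ rest, 0 ≤ q ∧ q < ((PySem.List.pySetD o p0 b).length : Int) := by
      intro q hq
      rw [hlen0, hlen]
      exact hbd q (List.mem_cons_of_mem _ hq)
    have hred : pvScatter o (b, p0 :: rest)
        = (PySem.List.enumerate rest 2).foldl
            (fun o' q => PySem.List.pySetD o' q.2 (b ++ "_" ++ PySem.Int.toStr q.1))
            (PySem.List.pySetD o p0 b) := rfl
    rw [hred, writeFold_getElem? b rest 2 _ i hndrest hbd']
    by_cases hib : bs[i]? = some b
    · rw [if_pos hib]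
      have hiin : (i : Int) ∈ p0 :: rest := (hmemchar i).mpr hib
      have hcnt : (p0 :: rest).idxOf (i : Int) = (bs.take i).count b := by
        have := idxOf_posIdx b bs 0 i hib
        rw [hps] at this
        simpa using this
      rw [pvSpec_getElem?, hib]
      simp only [Option.map_some, List.count_nil, Nat.zero_add]
      by_cases hmem : (i : Int) ∈ rest
      · rw [if_pos hmem]
        have hip0 : (i : Int) ≠ p0 := fun h => hp0not (h ▸ hmem)
        have hidx : (p0 :: rest).idxOf (i : Int) = rest.idxOf (i : Int) + 1 := by
          rw [List.idxOf_cons]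
          have hpi : (p0 == (i : Int)) = false := by
            simp
            omega
          rw [hpi, cond_false]
        have hc : (bs.take i).count b = rest.idxOf (i : Int) + 1 := by
          rw [← hcnt, hidx]
        rw [hc]
        rw [if_neg (by omega)]
        have harg : (2 : Int) + (rest.idxOf (i : Int) : Int)
            = ((rest.idxOf (i : Int) + 1 : Nat) : Int) + 1 := by push_cast; omega
        rw [harg]
      · rw [if_neg hmem]
        have hip0 : (i : Int) = p0 := by
          rcases List.mem_cons.mp hiin with h | h
          · exact h
          · exact absurd h hmem
        have hc : (bs.take i).count b = 0 := by
          rw [← hcnt, ← hip0, List.idxOf_cons]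
          simp
        rw [hc, if_pos rfl, hset0, set_getElem?]
        rw [if_pos ⟨by omega, by omega⟩]
    · rw [if_neg hib]
      have hnin : ¬ ((i : Int) ∈ p0 :: rest) := fun h => hib ((hmemchar i).mp h)
      rw [if_neg (fun h => hnin (List.mem_cons_of_mem _ h))]
      rw [hset0, set_getElem?]
      rw [if_neg (by
        intro ⟨h1, _⟩
        exact hnin (List.mem_cons.mpr (Or.inl (by omega))))]

lemma fold_groups (bs : List String) :
    ∀ (ks : List String) (o : List String), o.length = bs.length → ∀ i : Nat,
      (ks.foldl (fun o b => pvScatter o (b, posIdx b 0 bs)) o)[i]?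
        = if (∃ b ∈ ks, bs[i]? = some b) then (pvSpec [] bs)[i]? else o[i]? := by
  intro ks
  induction ks with
  | nil => intro o _ i; simp
  | cons b ks ih =>
    intro o hlen i
    simp only [List.foldl_cons]
    have hlen' : (pvScatter o (b, posIdx b 0 bs)).length = bs.length := by
      rw [pvScatter_length, hlen]
    rw [ih _ hlen' i]
    by_cases h1 : ∃ b' ∈ ks, bs[i]? = some b'
    · rw [if_pos h1]
      obtain ⟨b', hb', he⟩ := h1
      rw [if_pos ⟨b', List.mem_cons_of_mem _ hb', he⟩]
    · rw [if_neg h1, pvScatter_getElem? bs b o hlen i]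
      by_cases h2 : bs[i]? = some b
      · rw [if_pos h2, if_pos ⟨b, List.mem_cons_self .., h2⟩]
      · rw [if_neg h2, if_neg (by
          rintro ⟨b', hb', he⟩
          rcases List.mem_cons.mp hb' with rfl | h
          · exact h2 he
          · exact h1 ⟨b', h, he⟩)]

lemma pvB_eq_spec (headers : List String) :
    dedupe_and_fill_headers_py_alt headers
      = pvSpec [] ((PySem.List.enumerate headers 1).map pvBaseB) := by
  unfold dedupe_and_fill_headers_py_alt
  show (((PySem.List.enumerate ((PySem.List.enumerate headers 1).map pvBaseB) 0).foldl
      (fun d q => d.modify q.2 [] (· ++ [q.1])) (PySem.Dict.empty)).items).foldl pvScatter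
      (List.replicate headers.length "") = _
  set bs := (PySem.List.enumerate headers 1).map pvBaseB with hbs
  have hlenbs : bs.length = headers.length := by
    simp [hbs, PySem.List.length_enumerate]
  set l := (PySem.List.enumerate bs 0).map Prod.swap with hl
  have hfold : (PySem.List.enumerate bs 0).foldl
      (fun d q => d.modify q.2 [] (· ++ [q.1])) (PySem.Dict.empty)
      = l.foldl (fun d p => d.modify p.1 [] (· ++ [p.2])) (PySem.Dict.empty) := by
    rw [hl, List.foldl_map]
    rfl
  rw [hfold]
  set groups := l.foldl (fun d p => d.modify p.1 [] (· ++ [p.2])) (PySem.Dict.empty) with hg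
  have hmapfst : l.map (·.1) = bs := by
    rw [hl, List.map_map]
    exact PySem.List.map_snd_enumerate bs 0
  have hkeys : groups.keys = PySem.Set.ofList bs := by
    rw [hg]
    rw [PySem.Dict.keys_foldl_modify_key l (fun p => p.1) [] (fun d p => (· ++ [p.2])) PySem.Dict.empty]
    rw [PySem.Dict.keys_empty, hmapfst]
    exact PySem.Set.update_nil_left bs
  have hnd : groups.keys.Nodup := by
    rw [hkeys]; exact PySem.Set.nodup_ofList bs
  have hgetD : ∀ c, groups.getD c [] = posIdx c 0 bs := by
    intro c
    rw [hg, PySem.Dict.getD_foldl_modify_append, PySem.Dict.getD_empty]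
    rw [List.nil_append]
    exact posIdx_eq_filter c bs 0
  have hitems : groups.items = (PySem.Set.ofList bs).map (fun k => (k, posIdx k 0 bs)) := by
    rw [PySem.Dict.items_eq_map_keys groups hnd [], hkeys]
    exact List.map_congr_left (fun k _ => by rw [hgetD k])
  rw [hitems, List.foldl_map]
  have hfin := fold_groups bs (PySem.Set.ofList bs) (List.replicate headers.length "")
    (by simp [hlenbs]) 
  apply List.ext_getElem?
  intro i
  rw [hfin i]
  by_cases hi : i < bs.length
  · rw [if_pos ⟨bs[i], (PySem.Set.mem_ofList ..).mpr (List.getElem_mem hi), List.getElem?_eq_getElem hi⟩]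
  · have h1 : bs[i]? = none := List.getElem?_eq_none (by omega)
    rw [if_neg (by rintro ⟨b', _, he⟩; rw [h1] at he; simp at he)]
    rw [List.getElem?_eq_none (by rw [List.length_replicate]; omega),
      List.getElem?_eq_none (by rw [pvSpec_length]; omega)]

-- ===== VERDICT (by name: the statement is the Claim_ definition above) =====
theorem dedupe_and_fill_headers_py_spec : Claim_equal_dedupe_and_fill_headers_py := by
  intro headers _
  unfold Spec_dedupe_and_fill_headers_py
  rw [pvA_eq_spec, pvB_eq_spec]
  rfl
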